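-- pv_equiv track=rewrite | github.com/sheat-git/mk8dx-bot | nameArrange.py | delTeam
-- ===== SOURCE A (Python) =====
-- def delTeam(name,word='team'):
--     if not word in name.lower():
--         return name
--     names = list(name.split())
--     if len(names) == 1:
--         return name
--     new_names = []
--     for n in names:
--         if not word in n.lower():
--             new_names.append(n)
--     if len(new_names) == 1:
--         return new_names[0]
--     elif new_names:
--         if word == 'mk':
--             return new_names[0]
--         return delTeam(' '.join(new_names),'mk')
--     return name
-- ===== SOURCE B (Python) =====
-- def delTeam(name, word='team'):
--     # Iterative two-pass formulation: first pass with `word`, second with 'mk'.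
--     current = name
--     for w in (word, 'mk'):
--         if w not in current.lower():
--             return current
--         names = current.split()
--         if len(names) == 1:
--             return current
--         kept = [n for n in names if w not in n.lower()]
--         if len(kept) == 1:
--             return kept[0]
--         if not kept:
--             return current
--         if w == 'mk':
--             return kept[0]
--         current = ' '.join(kept)
--     return current
-- ===== Notes on version B (the rewrite author's own statement) =====
-- stated objective: simpler
-- what changed: Replaces A's tail recursion (whose depth is bounded by the forced second word 'mk') with an explicit two-pass loop over the word sequence (word, 'mk'), keeping a current string and building the kept tokens with a comprehension instead of an append loop.
import Mathlib
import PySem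

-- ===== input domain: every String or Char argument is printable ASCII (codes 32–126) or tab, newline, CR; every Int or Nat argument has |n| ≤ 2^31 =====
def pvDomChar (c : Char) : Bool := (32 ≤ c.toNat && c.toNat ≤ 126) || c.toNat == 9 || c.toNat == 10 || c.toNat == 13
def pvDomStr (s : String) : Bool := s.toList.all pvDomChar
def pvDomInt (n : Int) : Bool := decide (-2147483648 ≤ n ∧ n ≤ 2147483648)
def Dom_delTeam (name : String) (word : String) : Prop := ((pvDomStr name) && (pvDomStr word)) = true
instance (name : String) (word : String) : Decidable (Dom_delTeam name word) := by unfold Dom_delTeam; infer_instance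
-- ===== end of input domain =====

-- B replaces A's tail recursion (depth ≤ 2, since the recursive call always passes 'mk'
-- and word == 'mk' returns before recursing) by an explicit loop over the two-word
-- sequence (word, 'mk'); objective: simpler (iterative decomposition), not faster.

-- ===== PORT A =====
-- literal transliteration of A; recursion terminates because the recursive call always
-- passes "mk" and is only taken when word ≠ "mk"
def delTeam (name : String) (word : String) : String :=
  if !(PySem.Str.isIn word (PySem.Str.lower name)) then name
  else
    let names := PySem.Str.split₀ name
    if names.length == 1 then name
    else
      let new_names := names.foldl
        (fun acc n => if !(PySem.Str.isIn word (PySem.Str.lower n)) then acc ++ [n] else acc) []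
      if new_names.length == 1 then new_names.headD name
      else if !(new_names == []) then
        if word == "mk" then new_names.headD name
        else delTeam (PySem.Str.join " " new_names) "mk"
      else name
termination_by (if word = "mk" then 0 else 1)
decreasing_by simp_all

-- ===== PORT B =====
-- B's loop 'for w in (word, "mk")' over the remaining word list, carrying `current`
def delTeamAltGo (current : String) : List String → String
  | [] => current
  | w :: ws =>
    if !(PySem.Str.isIn w (PySem.Str.lower current)) then current
    else
      let names := PySem.Str.split₀ current
      if names.length == 1 then current
      else
        let kept := names.filter (fun n => !(PySem.Str.isIn w (PySem.Str.lower n)))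
        if kept.length == 1 then kept.headD current
        else if kept == [] then current
        else if w == "mk" then kept.headD current
        else delTeamAltGo (PySem.Str.join " " kept) ws

def delTeam_alt (name : String) (word : String) : String :=
  delTeamAltGo name [word, "mk"]

-- ===== PRECONDITION & SPEC =====
def Spec_delTeam (name : String) (word : String) (out : String) : Prop := out = delTeam_alt name word
instance (name : String) (word : String) (out : String) : Decidable (Spec_delTeam name word out) := by unfold Spec_delTeam; infer_instance

-- ===== CLAIM (what is proved, stated in full; the proofs are below) =====
def Claim_equal_delTeam : Prop := ∀ (name : String) (word : String), Dom_delTeam name word → Spec_delTeam name word (delTeam name word)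

-- ===== LEMMAS AND PROOFS =====

-- A's append loop builds exactly B's filtered list
theorem delTeam_keep_eq (names : List String) (word : String) :
    names.foldl
      (fun acc n => if !(PySem.Str.isIn word (PySem.Str.lower n)) then acc ++ [n] else acc) [] =
    names.filter (fun n => !(PySem.Str.isIn word (PySem.Str.lower n))) := by
  simpa using PySem.List.foldl_append_if_eq_filter
    (l := names) (p := fun n => !(PySem.Str.isIn word (PySem.Str.lower n))) (acc := [])

-- with word = "mk" a pass never continues, so any tail of further words is irrelevant
theorem delTeam_mk_eq (c : String) (ws : List String) :
    delTeam c "mk" = delTeamAltGo c ("mk" :: ws) := by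
  rw [delTeam, delTeamAltGo]; simp only [delTeam_keep_eq]
  split_ifs with g1 g2 g3 g4 g5 <;> simp_all
  obtain ⟨x, hx, hfx⟩ := g4
  simp_all

theorem delTeam_eq_alt (name word : String) :
    delTeam name word = delTeam_alt name word := by
  by_cases h : word = "mk"
  · subst h; exact delTeam_mk_eq name ["mk"]
  · rw [delTeam]
    unfold delTeam_alt delTeamAltGo
    simp only [delTeam_keep_eq]
    split_ifs with h1 h2 h3 h4 h5 <;> simp_all
    · obtain ⟨x, hx, hfx⟩ := h4
      simp_all
    · exact delTeam_mk_eq _ _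

-- ===== VERDICT (by name: the statement is the Claim_ definition above) =====
theorem delTeam_spec : Claim_equal_delTeam := by
  intro name word _
  unfold Spec_delTeam
  exact delTeam_eq_alt name word
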